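-- pv_equiv track=rewrite | github.com/OlgaKochneva/advent-of-code | 2015/5.py | is_string_nice_2
-- ===== SOURCE A (Python) =====
-- def is_string_nice_2(line: str) -> bool:
--     condition_1 = False # contains pair of any two letters that appears at least twice in the string
--     condition_2 = False # contains one letter which repeats with exactly one letter between them
--     line_size = len(line)
--
--     if line_size < 4: return False
--
--     condition_1_substr = {}
--     for i in range(line_size):
--         substr = line[i:i + 2]
--         if substr in condition_1_substr:
--             # check overlapping
--             if i - condition_1_substr[substr] > 1:
--                 condition_1 = True
--                 break
--         else:
--             # save only leftmost index of substring so the aaaa or abab would work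
--             condition_1_substr[substr] = i
--
--     for i in range(line_size - 2):
--         substr = line[i:i + 3]
--         if substr[0] == substr[-1]:
--             condition_2 = True
--             break
--
--     return condition_1 and condition_2
-- ===== SOURCE B (Python) =====
-- def is_string_nice_2(line: str) -> bool:
--     n = len(line)
--     if n < 4:
--         return False
--     condition_1 = any(line[i:i + 2] in line[i + 2:] for i in range(n - 1))
--     condition_2 = any(line[i] == line[i + 2] for i in range(n - 2))
--     return condition_1 and condition_2
-- ===== Notes on version B (the rewrite author's own statement) =====
-- stated objective: idiomatic
-- what changed: Condition 1 drops A's leftmost-index dict table entirely and instead tests for each position whether the two-char pair reappears in the non-overlapping suffix line[i+2:]; condition 2 becomes an any() over direct character comparisons line[i]==line[i+2] instead of slicing three-char substrings and comparing their ends.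
import Mathlib
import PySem

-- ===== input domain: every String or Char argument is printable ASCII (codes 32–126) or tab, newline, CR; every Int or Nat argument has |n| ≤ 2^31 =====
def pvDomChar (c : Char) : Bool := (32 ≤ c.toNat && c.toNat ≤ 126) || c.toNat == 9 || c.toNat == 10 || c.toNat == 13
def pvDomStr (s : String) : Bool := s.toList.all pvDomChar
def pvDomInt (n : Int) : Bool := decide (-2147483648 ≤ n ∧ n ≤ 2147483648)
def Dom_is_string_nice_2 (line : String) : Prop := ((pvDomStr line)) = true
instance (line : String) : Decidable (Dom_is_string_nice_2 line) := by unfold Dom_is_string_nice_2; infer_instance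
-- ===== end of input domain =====

-- B replaces A's leftmost-index pair table by a direct rescan of the suffix for each pair (idiomatic any()/substring-in test); same results on every input.

-- ===== PORT A =====
-- first for-loop of A, with its break (the dict keeps only the leftmost index of each two-char slice)
def pvLoopA1 (cs : List Char) : List Int → PySem.Dict (List Char) Int → Bool
  | [], _ => false
  | i :: rest, d =>
    let substr := PySem.List.slice cs (some i) (some (i + 2))
    match d.get? substr with
    | some j => if i - j > 1 then true else pvLoopA1 cs rest d
    | none => pvLoopA1 cs rest (d.insert substr i)

-- second for-loop of A, with its break (compares first and last char of the three-char slice)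
def pvLoopA2 (cs : List Char) : List Int → Bool
  | [] => false
  | i :: rest =>
    let substr := PySem.List.slice cs (some i) (some (i + 3))
    if PySem.List.pyGet? substr 0 = PySem.List.pyGet? substr (-1) then true
    else pvLoopA2 cs rest

def is_string_nice_2 (line : String) : Bool :=
  let cs := line.toList
  let line_size : Int := PySem.Str.len line
  if line_size < 4 then false
  else
    let condition_1 := pvLoopA1 cs (PySem.List.pyRange 0 line_size 1) PySem.Dict.empty
    let condition_2 := pvLoopA2 cs (PySem.List.pyRange 0 (line_size - 2) 1)
    condition_1 && condition_2

-- ===== PORT B =====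
def is_string_nice_2_alt (line : String) : Bool :=
  let cs := line.toList
  let n : Int := PySem.Str.len line
  if n < 4 then false
  else
    let condition_1 := (PySem.List.pyRange 0 (n - 1) 1).any fun i =>
      PySem.Chars.isIn (PySem.List.slice cs (some i) (some (i + 2)))
                       (PySem.List.slice cs (some (i + 2)) none)
    let condition_2 := (PySem.List.pyRange 0 (n - 2) 1).any fun i =>
      PySem.List.pyGet? cs i == PySem.List.pyGet? cs (i + 2)
    condition_1 && condition_2

-- ===== PRECONDITION & SPEC =====
def Spec_is_string_nice_2 (line : String) (out : Bool) : Prop := out = is_string_nice_2_alt line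
instance (line : String) (out : Bool) : Decidable (Spec_is_string_nice_2 line out) := by unfold Spec_is_string_nice_2; infer_instance

-- ===== CLAIM (what is proved, stated in full; the proofs are below) =====
def Claim_equal_is_string_nice_2 : Prop := ∀ (line : String), Dom_is_string_nice_2 line → Spec_is_string_nice_2 line (is_string_nice_2 line)

-- ===== LEMMAS AND PROOFS =====

-- the two-char window starting at i (clamped at the end, exactly like the Python slice)
def pairAt (cs : List Char) (i : Nat) : List Char := (cs.drop i).take 2

-- the common meaning of condition 1: some two-char pair occurs twice without overlapping
def HasPair (cs : List Char) : Prop :=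
  ∃ i j : Nat, i + 2 ≤ j ∧ j + 2 ≤ cs.length ∧ pairAt cs i = pairAt cs j

lemma pairAt_slice (cs : List Char) (k : Nat) :
    PySem.List.slice cs (some (k : Int)) (some ((k : Int) + 2)) = pairAt cs k := by
  rw [PySem.List.slice_toNat cs (by positivity) (by positivity)]
  have h2 : ((k : Int) + 2).toNat = k + 2 := by omega
  simp [pairAt, h2]

lemma pairAt_len2 (cs : List Char) {k : Nat} (hk : k + 2 ≤ cs.length) :
    (pairAt cs k).length = 2 := by simp [pairAt]; omega

-- a pair re-occurs in the suffix cs[k+2:] iff it occurs at some full position j ≥ k+2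
lemma infix_iff_occ (cs : List Char) {k : Nat} (hk : k + 2 ≤ cs.length) :
    pairAt cs k <:+: cs.drop (k + 2) ↔
    ∃ j : Nat, k + 2 ≤ j ∧ j + 2 ≤ cs.length ∧ pairAt cs k = pairAt cs j := by
  constructor
  · rintro ⟨s, t, h⟩
    refine ⟨k + 2 + s.length, by omega, ?_, ?_⟩
    · have hl := congrArg List.length h
      simp [pairAt_len2 cs hk] at hl
      omega
    · have hdrop : cs.drop (k + 2 + s.length) = pairAt cs k ++ t := by
        have h2 : cs.drop (k + 2 + s.length) = (cs.drop (k + 2)).drop s.length := by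
          rw [List.drop_drop]
        rw [h2, ← h, List.append_assoc, List.drop_left]
      have h3 : pairAt cs (k + 2 + s.length) = (pairAt cs k ++ t).take 2 := by
        rw [pairAt, hdrop]
      rw [h3, List.take_left' (pairAt_len2 cs hk)]
  · rintro ⟨j, hkj, hjn, hp⟩
    refine ⟨(cs.drop (k + 2)).take (j - (k + 2)), cs.drop (j + 2), ?_⟩
    have h1 : pairAt cs k ++ cs.drop (j + 2) = cs.drop j := by
      rw [hp, pairAt]
      have h4 : cs.drop (j + 2) = (cs.drop j).drop 2 := by rw [List.drop_drop]
      rw [h4, List.take_append_drop]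
    rw [List.append_assoc, h1]
    have h2 : cs.drop j = (cs.drop (k + 2)).drop (j - (k + 2)) := by
      rw [List.drop_drop]; congr 1; omega
    rw [h2, List.take_append_drop]

-- B's condition 1 means HasPair
lemma altC1_iff (cs : List Char) :
    ((PySem.List.pyRange 0 ((cs.length : Int) - 1) 1).any fun i =>
      PySem.Chars.isIn (PySem.List.slice cs (some i) (some (i + 2)))
                       (PySem.List.slice cs (some (i + 2)) none)) = true ↔ HasPair cs := by
  rw [List.any_eq_true]
  constructor
  · rintro ⟨i, hmem, hp⟩
    rw [PySem.List.mem_pyRange_one] at hmem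
    obtain ⟨h0, h1⟩ := hmem
    obtain ⟨k, rfl⟩ := Int.eq_ofNat_of_zero_le h0
    have hk2 : k + 2 ≤ cs.length := by omega
    rw [pairAt_slice, PySem.List.slice_from cs (by positivity)] at hp
    have htn : ((k : Int) + 2).toNat = k + 2 := by omega
    rw [htn] at hp
    rw [PySem.Chars.isIn_iff_infix, infix_iff_occ cs hk2] at hp
    obtain ⟨j, hkj, hjn, hpe⟩ := hp
    exact ⟨k, j, hkj, hjn, hpe⟩
  · rintro ⟨i, j, hij, hjn, hpe⟩
    refine ⟨(i : Int), ?_, ?_⟩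
    · rw [PySem.List.mem_pyRange_one]
      constructor <;> [positivity; omega]
    · have hk2 : i + 2 ≤ cs.length := by omega
      rw [pairAt_slice, PySem.List.slice_from cs (by positivity)]
      have htn : ((i : Int) + 2).toNat = i + 2 := by omega
      rw [htn, PySem.Chars.isIn_iff_infix, infix_iff_occ cs hk2]
      exact ⟨j, hij, hjn, hpe⟩

-- A's first loop means HasPair too, by the leftmost-index dict invariant
theorem loopA1_main (cs : List Char) : ∀ (fuel k : Nat) (d : PySem.Dict (List Char) Int),
    cs.length - k ≤ fuel → k ≤ cs.length →
    (∀ key v, d.get? key = some v →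
      ∃ m : Nat, v = (m : Int) ∧ m < k ∧ pairAt cs m = key ∧ ∀ u < m, pairAt cs u ≠ key) →
    (∀ m < k, ∃ v, d.get? (pairAt cs m) = some v) →
    (¬ ∃ i j : Nat, i + 2 ≤ j ∧ j < k ∧ pairAt cs i = pairAt cs j) →
    (pvLoopA1 cs (PySem.List.pyRange (k : Int) (cs.length : Int) 1) d = true ↔ HasPair cs) := by
  intro fuel
  induction fuel with
  | zero =>
    intro k d hfuel hk hA hB hC
    have hkn : k = cs.length := by omega
    subst hkn
    rw [PySem.List.pyRange_one_eq_nil (le_refl _)]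
    simp [pvLoopA1]
    rintro ⟨i, j, hij, hjn, hpe⟩
    exact hC ⟨i, j, hij, by omega, hpe⟩
  | succ fuel ih =>
    intro k d hfuel hk hA hB hC
    by_cases hkn : k = cs.length
    · subst hkn
      rw [PySem.List.pyRange_one_eq_nil (le_refl _)]
      simp [pvLoopA1]
      rintro ⟨i, j, hij, hjn, hpe⟩
      exact hC ⟨i, j, hij, by omega, hpe⟩
    · have hklt : k < cs.length := by omega
      rw [PySem.List.pyRange_one_cons (by exact_mod_cast hklt)]
      have hcast : (k : Int) + 1 = ((k + 1 : Nat) : Int) := by push_cast; ring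
      rw [hcast]
      simp only [pvLoopA1, pairAt_slice]
      cases hd : d.get? (pairAt cs k) with
      | some v =>
        obtain ⟨m, rfl, hmk, hpm, hleft⟩ := hA _ _ hd
        dsimp only
        by_cases hgap : (k : Int) - (m : Int) > 1
        · rw [if_pos hgap]
          simp only [true_iff]
          have hk2 : k + 2 ≤ cs.length := by
            have := congrArg List.length hpm
            simp [pairAt] at this
            omega
          exact ⟨m, k, by omega, hk2, hpm⟩
        · rw [if_neg hgap]
          apply ih (k + 1) d (by omega) (by omega)
          · intro key v hv
            obtain ⟨m', h1, h2, h3, h4⟩ := hA key v hv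
            exact ⟨m', h1, by omega, h3, h4⟩
          · intro m' hm'
            by_cases h : m' < k
            · exact hB m' h
            · have : m' = k := by omega
              subst this
              exact ⟨(m : Int), hd⟩
          · rintro ⟨i, j, hij, hjk, hpe⟩
            by_cases h : j < k
            · exact hC ⟨i, j, hij, h, hpe⟩
            · have : j = k := by omega
              subst this
              exact hleft i (by omega) hpe
      | none =>
        dsimp only
        apply ih (k + 1) (d.insert (pairAt cs k) (k : Int)) (by omega) (by omega)
        · intro key v hv
          rw [PySem.Dict.get?_insert] at hv
          split at hv
          · rename_i heq
            subst heq
            refine ⟨k, by injection hv with h; exact h.symm, by omega, rfl, ?_⟩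
            intro u hu hcontra
            obtain ⟨w, hw⟩ := hB u hu
            rw [hcontra, hd] at hw
            simp at hw
          · obtain ⟨m', h1, h2, h3, h4⟩ := hA key v hv
            exact ⟨m', h1, by omega, h3, h4⟩
        · intro m' hm'
          by_cases heq : pairAt cs m' = pairAt cs k
          · rw [heq, PySem.Dict.get?_insert_self]
            exact ⟨(k : Int), rfl⟩
          · rw [PySem.Dict.get?_insert_of_ne _ _ heq]
            rcases Nat.lt_succ_iff_lt_or_eq.mp hm' with h | h
            · exact hB m' h
            · exact absurd (h ▸ rfl) heq
        · rintro ⟨i, j, hij, hjk, hpe⟩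
          by_cases h : j < k
          · exact hC ⟨i, j, hij, h, hpe⟩
          · have : j = k := by omega
            subst this
            obtain ⟨w, hw⟩ := hB i (by omega)
            rw [hpe, hd] at hw
            simp at hw

-- A's second loop is the early-exit form of an any()
lemma loopA2_eq_any (cs : List Char) (l : List Int) :
    pvLoopA2 cs l = l.any (fun i =>
      decide (PySem.List.pyGet? (PySem.List.slice cs (some i) (some (i + 3))) 0 =
              PySem.List.pyGet? (PySem.List.slice cs (some i) (some (i + 3))) (-1))) := by
  induction l with
  | nil => rfl
  | cons i rest ih =>
    simp only [pvLoopA2, List.any_cons]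
    split <;> simp_all

-- A's condition-2 test equals B's, pointwise on the shared range
lemma c2_pointwise (cs : List Char) {i : Int} (h0 : 0 ≤ i) (h2 : i < (cs.length : Int) - 2) :
    (decide (PySem.List.pyGet? (PySem.List.slice cs (some i) (some (i + 3))) 0 =
             PySem.List.pyGet? (PySem.List.slice cs (some i) (some (i + 3))) (-1)))
    = (PySem.List.pyGet? cs i == PySem.List.pyGet? cs (i + 2)) := by
  obtain ⟨k, rfl⟩ := Int.eq_ofNat_of_zero_le h0
  have hk3 : k + 3 ≤ cs.length := by omega
  have hs : PySem.List.slice cs (some (k:Int)) (some ((k:Int)+3)) = (cs.drop k).take 3 := by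
    rw [PySem.List.slice_toNat _ (by positivity) (by positivity)]
    congr 1; omega
  have hlen : ((cs.drop k).take 3).length = 3 := by simp; omega
  have hg0 : PySem.List.pyGet? ((cs.drop k).take 3) 0 = cs[k]? := by
    have h00 : (0 : Int) = ((0 : Nat) : Int) := rfl
    rw [h00, PySem.List.pyGet?_natCast]
    rw [List.getElem?_take_of_lt (by omega), List.getElem?_drop]
    simp
  have hgm1 : PySem.List.pyGet? ((cs.drop k).take 3) (-1) = cs[k+2]? := by
    simp only [PySem.List.pyGet?, PySem.List.pyIdx?, hlen]
    norm_num
  have hr0 : PySem.List.pyGet? cs ((k:Int)) = cs[k]? := PySem.List.pyGet?_natCast cs k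
  have hr2 : PySem.List.pyGet? cs ((k:Int) + 2) = cs[k+2]? := by
    have hc : (k:Int) + 2 = ((k+2 : Nat) : Int) := by push_cast; ring
    rw [hc, PySem.List.pyGet?_natCast]
  rw [hs, hg0, hgm1, hr0, hr2]
  exact Eq.symm (Bool.beq_eq_decide_eq _ _)

-- ===== VERDICT (by name: the statement is the Claim_ definition above) =====
theorem is_string_nice_2_spec : Claim_equal_is_string_nice_2 := by
  intro line _
  unfold Spec_is_string_nice_2 is_string_nice_2 is_string_nice_2_alt
  simp only [PySem.Str.len_eq]
  by_cases h4 : ((line.toList.length : Int)) < 4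
  · simp only [if_pos h4]
  · simp only [if_neg h4]
    have hc1 : pvLoopA1 line.toList (PySem.List.pyRange 0 (line.toList.length : Int) 1)
        PySem.Dict.empty =
        ((PySem.List.pyRange 0 ((line.toList.length : Int) - 1) 1).any fun i =>
          PySem.Chars.isIn (PySem.List.slice line.toList (some i) (some (i + 2)))
                           (PySem.List.slice line.toList (some (i + 2)) none)) := by
      apply Bool.coe_iff_coe.mp
      rw [altC1_iff]
      have h0 : (0 : Int) = ((0 : Nat) : Int) := rfl
      rw [h0]
      exact loopA1_main line.toList line.toList.length 0 PySem.Dict.empty (by omega) (by omega)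
        (fun key v hv => by rw [PySem.Dict.get?_empty] at hv; simp at hv)
        (fun m hm => absurd hm (by omega))
        (by rintro ⟨i, j, _, hj, _⟩; omega)
    have hc2 : pvLoopA2 line.toList (PySem.List.pyRange 0 ((line.toList.length : Int) - 2) 1) =
        ((PySem.List.pyRange 0 ((line.toList.length : Int) - 2) 1).any fun i =>
          PySem.List.pyGet? line.toList i == PySem.List.pyGet? line.toList (i + 2)) := by
      rw [loopA2_eq_any]
      apply PySem.List.any_congr_mem
      intro i hi
      rw [PySem.List.mem_pyRange_one] at hi
      exact c2_pointwise line.toList hi.1 hi.2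
    rw [hc1, hc2]
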